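-- pv_equiv track=rewrite | github.com/sagemath/sagetrac-mirror | src/sage/functions/multiple_zeta.py | bintocomp
-- ===== SOURCE A (Python) =====
-- def bintocomp(a):
--     r"""
--     This program converts binary word to composition
--
--     Input- array  correspond to the binery word
--
--     Output- array correspond to the composition:
--
--     EXAMPLES::
--
--         sage: from sage.functions.multiple_zeta import *
--         sage: bintocomp([0,1,0,1,0,1])
--         [2, 2, 2]
--         sage: bintocomp([0,1,0,1,0,1,0,0,0,0,1])
--         [2, 2, 2, 5]
--     """
--     b = []
--     count = 1
--     for j in range(len(a)):
--         if a[j] == 0: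
--             count += 1
--         else:
--             b.append(count)
--             count = 1
--     return b
-- ===== SOURCE B (Python) =====
-- def bintocomp(a):
--     positions = [i for i, x in enumerate(a) if x != 0]
--     b = []
--     prev = -1
--     for p in positions:
--         b.append(p - prev)
--         prev = p
--     return b
-- ===== Notes on version B (the rewrite author's own statement) =====
-- stated objective: alternative
-- what changed: Replaces A's running-count-with-reset accumulator by a two-pass computation: first collect the indices of all nonzero entries, then emit consecutive differences of those indices (seeded with -1).
import Mathlib
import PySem

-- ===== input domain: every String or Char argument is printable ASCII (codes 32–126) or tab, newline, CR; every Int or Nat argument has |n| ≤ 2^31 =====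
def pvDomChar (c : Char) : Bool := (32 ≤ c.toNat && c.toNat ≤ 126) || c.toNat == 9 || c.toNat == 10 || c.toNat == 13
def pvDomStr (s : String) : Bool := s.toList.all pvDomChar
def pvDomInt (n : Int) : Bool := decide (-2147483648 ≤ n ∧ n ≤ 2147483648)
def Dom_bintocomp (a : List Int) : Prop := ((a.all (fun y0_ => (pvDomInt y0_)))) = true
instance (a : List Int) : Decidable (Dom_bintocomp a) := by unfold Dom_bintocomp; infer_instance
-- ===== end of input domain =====

-- B replaces A's running-count-and-reset loop by a two-pass computation (collect nonzero
-- positions, then take consecutive differences); same values, no speed claim.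

-- ===== PORT A =====
-- A: b = []; count = 1; for each element: if 0 then count += 1 else append count, count = 1.
def bintocomp (a : List Int) : List Int :=
  (a.foldl (fun (s : List Int × Int) x =>
      if x = 0 then (s.1, s.2 + 1) else (s.1 ++ [s.2], 1)) ([], 1)).1

-- ===== PORT B =====
-- B: positions = [i for i, x in enumerate(a) if x != 0]; prev = -1; append p - prev each step.
def bintocomp_alt (a : List Int) : List Int :=
  let positions := ((PySem.List.enumerate a 0).filter (fun p => p.2 != 0)).map (·.1)
  (positions.foldl (fun (s : List Int × Int) p => (s.1 ++ [p - s.2], p)) ([], -1)).1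

-- ===== PRECONDITION & SPEC =====
def Spec_bintocomp (a : List Int) (out : List Int) : Prop := out = bintocomp_alt a
instance (a : List Int) (out : List Int) : Decidable (Spec_bintocomp a out) := by unfold Spec_bintocomp; infer_instance

-- ===== CLAIM (what is proved, stated in full; the proofs are below) =====
def Claim_equal_bintocomp : Prop := ∀ (a : List Int), Dom_bintocomp a → Spec_bintocomp a (bintocomp a)

-- ===== LEMMAS AND PROOFS =====

-- reference form: composition with a running count
def pvComp : List Int → Int → List Int
  | [], _ => []
  | x :: xs, c => if x = 0 then pvComp xs (c + 1) else c :: pvComp xs 1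

theorem pvA_fold (a : List Int) : ∀ (acc : List Int) (c : Int),
    (a.foldl (fun (s : List Int × Int) x =>
      if x = 0 then (s.1, s.2 + 1) else (s.1 ++ [s.2], 1)) (acc, c)).1 = acc ++ pvComp a c := by
  induction a with
  | nil => intro acc c; simp [pvComp]
  | cons x xs ih =>
    intro acc c
    by_cases hx : x = 0 <;> simp [pvComp, hx, ih, List.append_assoc]

theorem pvB_fold (a : List Int) : ∀ (s : Int) (acc : List Int) (prev : Int),
    ((((PySem.List.enumerate a s).filter (fun p => p.2 != 0)).map (·.1)).foldl
      (fun (t : List Int × Int) p => (t.1 ++ [p - t.2], p)) (acc, prev)).1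
    = acc ++ pvComp a (s - prev) := by
  induction a with
  | nil => intro s acc prev; simp [PySem.List.enumerate_nil, pvComp]
  | cons x xs ih =>
    intro s acc prev
    by_cases hx : x = 0
    · have h1 : s + 1 - prev = s - prev + 1 := by ring
      simp [PySem.List.enumerate_cons, pvComp, hx, ih, h1]
    · have h1 : s + 1 - s = (1 : Int) := by ring
      simp [PySem.List.enumerate_cons, pvComp, hx, ih, h1, List.append_assoc]

-- ===== VERDICT (by name: the statement is the Claim_ definition above) =====
theorem bintocomp_spec : Claim_equal_bintocomp := by
  intro a _
  unfold Spec_bintocomp bintocomp bintocomp_alt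
  have hA := pvA_fold a [] 1
  have hB := pvB_fold a 0 [] (-1)
  simp only [List.nil_append] at hA hB
  simp only [hA]
  norm_num at hB
  simp [hB]
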